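-- pv_equiv track=rewrite | github.com/MrBrantCode/unitest_baseline | mut_generate/mist_train_taco/taco_7840/solution.py | minimum_bottom_walkers
-- ===== SOURCE A (Python) =====
-- def minimum_bottom_walkers(N, power_info):
--     # Initialize the dp array and other necessary variables
--     dp = [999999999] * (N + 1)
--     dp[0] = 0
--
--     # Create the capacity and cumulative weight arrays
--     c = [0] + [ci for ci, wi in power_info]
--     sum_w = [0] + [wi for ci, wi in power_info]
--
--     # Calculate the cumulative weights
--     for i in range(1, len(sum_w)):
--         sum_w[i] += sum_w[i - 1]
--
--     # Initialize the p matrix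
--     p = [[i == j for j in range(N + 1)] for i in range(N + 1)]
--
--     # Fill the p matrix based on the lifting conditions
--     for length in range(N):
--         for i in range(1, N + 1 - length):
--             j = i + length
--             if not p[i][j]:
--                 continue
--             if j + 1 <= N:
--                 if sum_w[j] - sum_w[i - 1] <= c[j + 1]:
--                     p[i][j + 1] = True
--             if sum_w[j] - sum_w[i - 1] <= c[i - 1]:
--                 p[i - 1][j] = True
--
--     # Calculate the minimum number of bottom walkers
--     for b in range(1, N + 1):
--         for e in range(1, N + 1):
--             if p[b][e]:
--                 dp[e] = min(dp[e], dp[b - 1] + 1)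
--
--     return dp[-1]
-- ===== SOURCE B (Python) =====
-- def minimum_bottom_walkers(N, power_info):
--     INF = 999999999
--     # 1-indexed capacities and prefix weights of the first N walkers
--     pref = [0]
--     cap = [0]
--     for k in range(N):
--         ci, wi = power_info[k]
--         cap.append(ci)
--         pref.append(pref[-1] + wi)
--     # Left-to-right sweep over the group end e.  For each e we scan b = e..1 once,
--     # deciding whether [b..e] is a liftable group from the previous column (prev,
--     # i.e. which starts could reach e-1) and from the start b+1 of the same column,
--     # and relax the partition DP on the fly.  Only O(N) state is kept.
--     dp = [0]
--     prev = set()  # starts b such that [b..e-1] is liftable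
--     for e in range(1, N + 1):
--         cur = set()
--         up = False  # whether [b+1..e] is liftable
--         best = INF
--         for b in range(e, 0, -1):
--             if b == e \
--                or (b in prev and pref[e - 1] - pref[b - 1] <= cap[e]) \
--                or (up and pref[e] - pref[b] <= cap[b]):
--                 cur.add(b)
--                 best = min(best, dp[b - 1] + 1)
--                 up = True
--             else:
--                 up = False
--         dp.append(best)
--         prev = cur
--     return dp[N]
-- ===== Notes on version B (the rewrite author's own statement) =====
-- stated objective: alternative
-- what changed: Replaces A's (N+1)x(N+1) push-filled boolean validity matrix (length-ordered expansion passes plus a separate double-loop partition DP) with a single left-to-right sweep over group ends that keeps only the set of valid group starts for the current end column (O(N) state) and relaxes the partition DP inside the same backward scan.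
import Mathlib
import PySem

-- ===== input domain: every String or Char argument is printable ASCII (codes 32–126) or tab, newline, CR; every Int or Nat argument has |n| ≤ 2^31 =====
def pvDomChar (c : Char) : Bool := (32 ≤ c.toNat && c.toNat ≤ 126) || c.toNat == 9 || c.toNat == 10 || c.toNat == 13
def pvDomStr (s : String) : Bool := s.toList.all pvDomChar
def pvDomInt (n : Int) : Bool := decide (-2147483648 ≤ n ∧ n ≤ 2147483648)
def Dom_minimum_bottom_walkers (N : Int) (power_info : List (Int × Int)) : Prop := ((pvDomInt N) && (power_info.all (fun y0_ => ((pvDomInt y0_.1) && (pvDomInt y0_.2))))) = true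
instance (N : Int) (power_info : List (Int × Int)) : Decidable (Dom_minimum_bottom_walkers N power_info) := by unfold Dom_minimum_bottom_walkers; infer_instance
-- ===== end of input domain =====

-- B replaces A's (N+1)^2 push-filled validity matrix and separate partition double loop
-- with a single left-to-right sweep keeping only the valid group starts of the current
-- column (O(N) state), relaxing the partition DP in the same backward scan.

-- ===== PORT A =====
-- A-side helpers: p[i][j] read and 'p[i][j] = True' write on the list-of-lists matrix
def getM (p : List (List Bool)) (i j : Nat) : Bool := (p.getD i []).getD j false
def setT (p : List (List Bool)) (i j : Nat) : List (List Bool) := p.set i ((p.getD i []).set j true)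

-- body of A's fill loop (one step: indices i, j = i + length)
def fillStep (n : Nat) (sw c : List Int) (len_ : Nat) (p : List (List Bool)) (i : Nat) : List (List Bool) :=
  let j := i + len_
  if !(getM p i j) then p
  else
    let p1 := if j + 1 ≤ n then
        (if sw.getD j 0 - sw.getD (i - 1) 0 ≤ c.getD (j + 1) 0 then setT p i (j + 1) else p)
      else p
    if sw.getD j 0 - sw.getD (i - 1) 0 ≤ c.getD (i - 1) 0 then setT p1 (i - 1) j else p1

-- body of A's dp double loop
def dpStep (pf : List (List Bool)) (b : Nat) (dp : List Int) (e : Nat) : List Int :=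
  if getM pf b e then dp.set e (min (dp.getD e 0) (dp.getD (b - 1) 0 + 1)) else dp

def minimum_bottom_walkers (N : Int) (power_info : List (Int × Int)) : Int :=
  let n : Nat := N.toNat
  let dp : List Int := (List.replicate (n + 1) (999999999 : Int)).set 0 0
  let c : List Int := 0 :: power_info.map (fun cw => cw.1)
  let sum_w0 : List Int := 0 :: power_info.map (fun cw => cw.2)
  let sum_w : List Int := (List.range' 1 (sum_w0.length - 1)).foldl
      (fun s i => s.set i (s.getD i 0 + s.getD (i - 1) 0)) sum_w0
  let p0 : List (List Bool) :=
    (List.range (n + 1)).map (fun i => (List.range (n + 1)).map (fun j => decide (i = j)))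
  let pf : List (List Bool) :=
    (List.range n).foldl (fun p len_ =>
      (List.range' 1 (n - len_)).foldl (fun p i => fillStep n sum_w c len_ p i) p) p0
  let dpf : List Int :=
    (List.range' 1 n).foldl (fun dp b =>
      (List.range' 1 n).foldl (fun dp e => dpStep pf b dp e) dp) dp
  PySem.List.pyGetD dpf (-1) 0

-- ===== PORT B =====
-- B-side helper: the backward scan over b = e..1 for one end position e
def bScan (pref cap dp : List Int) (prev : PySem.Set Nat) (e : Nat) : PySem.Set Nat × Bool × Int :=
  ((List.range' 1 e).reverse).foldl
    (fun acc b =>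
      if (b == e
          || (PySem.Set.contains prev b && decide (pref.getD (e - 1) 0 - pref.getD (b - 1) 0 ≤ cap.getD e 0))
          || (acc.2.1 && decide (pref.getD e 0 - pref.getD b 0 ≤ cap.getD b 0)))
      then (PySem.Set.add acc.1 b, true, min acc.2.2 (dp.getD (b - 1) 0 + 1))
      else (acc.1, false, acc.2.2))
    (PySem.Set.empty, false, (999999999 : Int))

def minimum_bottom_walkers_alt (N : Int) (power_info : List (Int × Int)) : Int :=
  let n : Nat := N.toNat
  let pc : List Int × List Int :=
    (List.range n).foldl (fun pc k =>
      let cw := power_info.getD k (0, 0)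
      (pc.1 ++ [pc.1.getLastD 0 + cw.2], pc.2 ++ [cw.1])) ([0], [0])
  let st : List Int × PySem.Set Nat :=
    (List.range' 1 n).foldl (fun st e =>
      let r := bScan pc.1 pc.2 st.1 st.2 e
      (st.1 ++ [r.2.2], r.1)) ([0], PySem.Set.empty)
  st.1.getD n 0

-- ===== PRECONDITION & SPEC =====
-- Pre_ excludes exactly the inputs where A raises IndexError: N < 0 (dp[0] on an empty
-- dp list) and N > len(power_info) (sum_w/c indexed past their length in the fill loop).
def Pre_minimum_bottom_walkers (N : Int) (power_info : List (Int × Int)) : Prop :=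
  0 ≤ N ∧ N ≤ (power_info.length : Int)
instance (N : Int) (power_info : List (Int × Int)) : Decidable (Pre_minimum_bottom_walkers N power_info) := by unfold Pre_minimum_bottom_walkers; infer_instance

def pvWitness_minimum_bottom_walkers : Int × (List (Int × Int)) := (3, [(3, 1), (2, 1), (4, 2)])

def Spec_minimum_bottom_walkers (N : Int) (power_info : List (Int × Int)) (out : Int) : Prop := out = minimum_bottom_walkers_alt N power_info
instance (N : Int) (power_info : List (Int × Int)) (out : Int) : Decidable (Spec_minimum_bottom_walkers N power_info out) := by unfold Spec_minimum_bottom_walkers; infer_instance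

-- ===== CLAIM (what is proved, stated in full; the proofs are below) =====
def Claim_equal_minimum_bottom_walkers : Prop := ∀ (N : Int) (power_info : List (Int × Int)), Dom_minimum_bottom_walkers N power_info → Pre_minimum_bottom_walkers N power_info → Spec_minimum_bottom_walkers N power_info (minimum_bottom_walkers N power_info)

-- ===== LEMMAS AND PROOFS =====

-- the common specification: prefix weights, capacities, liftable intervals, partition DP
def pvS (pi : List (Int × Int)) (k : Nat) : Int := ((pi.take k).map (fun cw => cw.2)).sum
def pvC (pi : List (Int × Int)) (k : Nat) : Int := if k = 0 then 0 else (pi.getD (k - 1) (0, 0)).1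

def pvV (pi : List (Int × Int)) (i j : Nat) : Bool :=
  if i = j then true
  else if i < j then
    (pvV pi i (j - 1) && decide (pvS pi (j - 1) - pvS pi (i - 1) ≤ pvC pi j))
    || (pvV pi (i + 1) j && decide (pvS pi j - pvS pi i ≤ pvC pi i))
  else false
termination_by j - i
decreasing_by all_goals omega

def pvD (pi : List (Int × Int)) : Nat → Int
  | 0 => 0
  | (e + 1) => ((List.range' 1 (e + 1)).attach).foldl
      (fun acc b => if pvV pi b.1 (e + 1) then min acc (pvD pi (b.1 - 1) + 1) else acc) 999999999
termination_by e => e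
decreasing_by
  have h := List.mem_range'_1.mp b.2; omega

def pvDfold (pi : List (Int × Int)) (e : Nat) (l : List Nat) : Int :=
  l.foldl (fun acc b => if pvV pi b e then min acc (pvD pi (b - 1) + 1) else acc) 999999999

def pvP (pi : List (Int × Int)) (m e : Nat) : Int :=
  if e = 0 then 0 else pvDfold pi e (List.range' 1 m)

def pvShape (p : List (List Bool)) (n : Nat) : Prop :=
  p.length = n + 1 ∧ ∀ r ∈ p, r.length = n + 1

-- the fill-loop invariant: passes of lengths < L done, and within pass L the rows i < i0 done
def pvMid (pi : List (Int × Int)) (n L i0 : Nat) (p : List (List Bool)) : Prop :=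
  pvShape p n ∧ ∀ i j, 1 ≤ i → i ≤ n →
    getM p i j = if j ≤ n ∧ i ≤ j then
      (if j - i ≤ L then pvV pi i j
       else if j - i = L + 1 then
         (if i + 2 ≤ i0 then pvV pi i j
          else if i + 1 = i0 then (pvV pi i (j - 1) && decide (pvS pi (j - 1) - pvS pi (i - 1) ≤ pvC pi j))
          else false)
       else false)
      else false

-- basic list-access helpers
lemma pvGetD_set_eq {α : Type} (l : List α) (i : Nat) (v d : α) (h : i < l.length) :
    (l.set i v).getD i d = v := by simp [List.getD, h]

lemma pvGetD_set_ne {α : Type} (l : List α) {i j : Nat} (v d : α) (h : i ≠ j) :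
    (l.set i v).getD j d = l.getD j d := by simp [List.getD, h]

lemma pvGetD_eq_getElem {α : Type} (l : List α) (i : Nat) (d : α) (h : i < l.length) :
    l.getD i d = l[i] := by simp [List.getD, List.getElem?_eq_getElem h]

lemma pvGetD_big {α : Type} (l : List α) (i : Nat) (d : α) (h : l.length ≤ i) :
    l.getD i d = d := by simp [List.getD, List.getElem?_eq_none h]

lemma pvMapRange_getD {α : Type} (f : Nat → α) (d : α) (n k : Nat) (h : k < n) :
    ((List.range n).map f).getD k d = f k := by
  rw [pvGetD_eq_getElem _ _ _ (by simpa using h)]; simp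

lemma pvVgt (pi : List (Int × Int)) {i j : Nat} (h : j < i) : pvV pi i j = false := by
  unfold pvV; rw [if_neg (by omega), if_neg (by omega)]

lemma pvS_succ (pi : List (Int × Int)) {k : Nat} (h : k < pi.length) :
    pvS pi (k + 1) = pvS pi k + (pi.getD k (0, 0)).2 := by
  rw [pvGetD_eq_getElem _ _ _ h]
  unfold pvS
  rw [List.map_take, List.map_take, ← List.take_concat_get' (pi.map (fun cw => cw.2)) k (by simpa using h)]
  simp

-- matrix lemmas
lemma pvShape_setT {p : List (List Bool)} {n : Nat} (hsh : pvShape p n) {a : Nat} (ha : a ≤ n) (b : Nat) :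
    pvShape (setT p a b) n := by
  refine ⟨by unfold setT; simpa using hsh.1, ?_⟩
  intro r hr
  rcases List.mem_or_eq_of_mem_set hr with h | h
  · exact hsh.2 r h
  · subst h
    rw [List.length_set]
    by_cases ha' : a < p.length
    · rw [pvGetD_eq_getElem _ _ _ ha']; exact hsh.2 _ (List.getElem_mem ha')
    · exact absurd (by rw [hsh.1]; omega : a < p.length) ha'

lemma pvGetM_setT {p : List (List Bool)} {n : Nat} (hsh : pvShape p n) {a b : Nat}
    (ha : a < n + 1) (hb : b < n + 1) (x y : Nat) :
    getM (setT p a b) x y = if x = a ∧ y = b then true else getM p x y := by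
  have hal : a < p.length := by rw [hsh.1]; omega
  have hrow : p.getD a [] = p[a] := pvGetD_eq_getElem _ _ _ hal
  have hrl : p[a].length = n + 1 := hsh.2 _ (List.getElem_mem hal)
  unfold getM setT
  by_cases hx : x = a
  · subst hx
    rw [pvGetD_set_eq _ _ _ _ hal, hrow]
    by_cases hy : y = b
    · subst hy
      rw [pvGetD_set_eq _ _ _ _ (by omega)]
      simp
    · rw [pvGetD_set_ne _ _ _ (fun hh => hy hh.symm)]
      simp [hy]
  · rw [pvGetD_set_ne _ _ _ (fun hh => hx hh.symm)]
    simp [hx]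

-- A: sum_w and c characterizations
lemma pvSumw_spec (pi : List (Int × Int)) : ∀ m, m ≤ pi.length →
    (((List.range' 1 m).foldl (fun s i => s.set i (s.getD i 0 + s.getD (i - 1) 0))
        ((0 : Int) :: pi.map (fun cw => cw.2))).length = pi.length + 1)
    ∧ (∀ k, k ≤ m →
        ((List.range' 1 m).foldl (fun s i => s.set i (s.getD i 0 + s.getD (i - 1) 0))
          ((0 : Int) :: pi.map (fun cw => cw.2))).getD k 0 = pvS pi k)
    ∧ (∀ k, m < k → k ≤ pi.length →
        ((List.range' 1 m).foldl (fun s i => s.set i (s.getD i 0 + s.getD (i - 1) 0))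
          ((0 : Int) :: pi.map (fun cw => cw.2))).getD k 0 = (pi.getD (k - 1) (0, 0)).2) := by
  intro m
  induction m with
  | zero =>
    intro _
    simp only [List.range'_zero, List.foldl_nil]
    refine ⟨by simp, ?_, ?_⟩
    · intro k hk
      have hk0 : k = 0 := by omega
      subst hk0
      simp [pvS, List.getD]
    · intro k h1 h2
      have hk' : k - 1 < pi.length := by omega
      rw [show k = (k - 1) + 1 by omega, List.getD_cons_succ,
          pvGetD_eq_getElem _ _ _ (by simpa using hk')]
      rw [pvGetD_eq_getElem _ _ _ (by omega)]
      simp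
  | succ m ih =>
    intro hm
    obtain ⟨ihl, ihin, ihout⟩ := ih (by omega)
    rw [List.range'_1_concat, List.foldl_append]
    simp only [List.foldl_cons, List.foldl_nil]
    set t := (List.range' 1 m).foldl (fun s i => s.set i (s.getD i 0 + s.getD (i - 1) 0))
        ((0 : Int) :: pi.map (fun cw => cw.2)) with htdef
    refine ⟨by simpa using ihl, ?_, ?_⟩
    · intro k hk
      by_cases hkm : k = 1 + m
      · subst hkm
        rw [pvGetD_set_eq _ _ _ _ (by rw [ihl]; omega)]
        rw [show 1 + m - 1 = m by omega, ihin m le_rfl, ihout (1 + m) (by omega) (by omega)]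
        rw [show 1 + m - 1 = m by omega, show (1 : Nat) + m = m + 1 by omega,
            pvS_succ pi (show m < pi.length by omega)]
        ring
      · rw [pvGetD_set_ne _ _ _ (fun hh => hkm hh.symm), ihin k (by omega)]
    · intro k h1 h2
      rw [pvGetD_set_ne _ _ _ (by omega), ihout k (by omega) h2]

lemma pvC_spec (pi : List (Int × Int)) (k : Nat) (hk : k ≤ pi.length) :
    ((0 : Int) :: pi.map (fun cw => cw.1)).getD k 0 = pvC pi k := by
  cases k with
  | zero => simp [pvC, List.getD]
  | succ k =>
    have hk' : k < pi.length := by omega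
    rw [List.getD_cons_succ, pvGetD_eq_getElem _ _ _ (by simpa using hk')]
    simp [pvC, List.getD, List.getElem?_eq_getElem hk']

-- A: fill-loop invariant lemmas
lemma pvMid_init (pi : List (Int × Int)) (n : Nat) :
    pvMid pi n 0 1 ((List.range (n + 1)).map (fun i => (List.range (n + 1)).map (fun j => decide (i = j)))) := by
  constructor
  · refine ⟨by simp, ?_⟩
    intro r hr
    obtain ⟨i, _, rfl⟩ := List.mem_map.mp hr
    simp
  · intro i j h1 hin
    have hrow : getM ((List.range (n + 1)).map (fun i => (List.range (n + 1)).map (fun j => decide (i = j)))) i j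
        = if j ≤ n then decide (i = j) else false := by
      unfold getM
      rw [pvMapRange_getD _ _ _ _ (by omega)]
      by_cases hj : j ≤ n
      · rw [pvMapRange_getD _ _ _ _ (by omega)]; simp [hj]
      · rw [pvGetD_big _ _ _ (by simp; omega)]; simp [hj]
    rw [hrow]
    by_cases hj : j ≤ n
    · by_cases hij : i ≤ j
      · by_cases heq : i = j
        · subst heq
          simp only [hj, hij, and_self, if_true, Nat.sub_self, Nat.le_refl, if_pos]
          unfold pvV; simp
        · have hlt : i < j := by omega
          simp only [hj, hij, and_self, if_true]
          rw [if_neg (show ¬ (j - i ≤ 0) by omega)]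
          by_cases h2 : j - i = 0 + 1
          · rw [if_pos h2, if_neg (by omega), if_neg (by omega)]; simp [heq]
          · rw [if_neg h2]; simp [heq]
      · have hne : i ≠ j := by omega
        simp [hij, hne]
    · simp [hj]

-- the heart of the A-side proof: one fillStep write-pair, stated for any matrix q whose
-- cells relate to p by the two conditional writes
lemma pvMid_step_general (pi : List (Int × Int)) (n L i0 : Nat) (p q : List (List Bool))
    (hsh : pvShape p n) (hI : ∀ i j, 1 ≤ i → i ≤ n →
      getM p i j = if j ≤ n ∧ i ≤ j then
        (if j - i ≤ L then pvV pi i j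
         else if j - i = L + 1 then
           (if i + 2 ≤ i0 then pvV pi i j
            else if i + 1 = i0 then (pvV pi i (j - 1) && decide (pvS pi (j - 1) - pvS pi (i - 1) ≤ pvC pi j))
            else false)
         else false)
        else false)
    (hi0 : 1 ≤ i0) (hle : i0 + L ≤ n)
    (hv : pvV pi i0 (i0 + L) = true)
    (wr wl : Bool)
    (hwr : wr = (decide (i0 + L + 1 ≤ n) && decide (pvS pi (i0 + L) - pvS pi (i0 - 1) ≤ pvC pi (i0 + L + 1))))
    (hwl : wl = decide (pvS pi (i0 + L) - pvS pi (i0 - 1) ≤ pvC pi (i0 - 1)))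
    (hqsh : pvShape q n)
    (hq : ∀ x y, 1 ≤ x → getM q x y =
      (if x = i0 ∧ y = i0 + L + 1 then wr
       else if x = i0 - 1 ∧ y = i0 + L then (getM p x y || wl)
       else getM p x y)) :
    pvMid pi n L (i0 + 1) q := by
  refine ⟨hqsh, ?_⟩
  intro i j' h1 hin
  rw [hq i j' h1]
  by_cases e1 : i = i0 ∧ j' = i0 + L + 1
  · rw [if_pos e1, hwr]
    obtain ⟨hE1, hE2⟩ := e1
    by_cases hjn1 : i0 + L + 1 ≤ n
    · rw [if_pos (show j' ≤ n ∧ i ≤ j' by omega), if_neg (show ¬ (j' - i ≤ L) by omega),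
        if_pos (show j' - i = L + 1 by omega), if_neg (show ¬ (i + 2 ≤ i0 + 1) by omega),
        if_pos (show i + 1 = i0 + 1 by omega)]
      rw [show pvV pi i (j' - 1) = pvV pi i0 (i0 + L) by rw [hE1, show j' - 1 = i0 + L by omega], hv]
      rw [show pvS pi (j' - 1) = pvS pi (i0 + L) by rw [show j' - 1 = i0 + L by omega],
          show pvS pi (i - 1) = pvS pi (i0 - 1) by rw [hE1],
          show pvC pi j' = pvC pi (i0 + L + 1) by rw [hE2]]
      simp [hjn1]
    · rw [if_neg (show ¬ (j' ≤ n ∧ i ≤ j') by omega)]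
      simp [hjn1]
  · rw [if_neg e1]
    by_cases e2 : i = i0 - 1 ∧ j' = i0 + L
    · rw [if_pos e2, hwl, hI i j' h1 hin]
      obtain ⟨hE1, hE2⟩ := e2
      have hi02 : 2 ≤ i0 := by omega
      -- reduce the old-form chain (left) then the new-form chain (right)
      rw [if_pos (show j' ≤ n ∧ i ≤ j' by omega), if_pos (show j' ≤ n ∧ i ≤ j' by omega),
          if_neg (show ¬ (j' - i ≤ L) by omega), if_neg (show ¬ (j' - i ≤ L) by omega),
          if_pos (show j' - i = L + 1 by omega), if_pos (show j' - i = L + 1 by omega),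
          if_neg (show ¬ (i + 2 ≤ i0) by omega), if_pos (show i + 1 = i0 by omega),
          if_pos (show i + 2 ≤ i0 + 1 by omega)]
      conv_rhs => rw [pvV]
      rw [if_neg (show ¬ (i = j') by omega), if_pos (show i < j' by omega)]
      rw [show pvV pi (i + 1) j' = pvV pi i0 (i0 + L) by rw [show i + 1 = i0 by omega, hE2], hv]
      rw [show pvS pi j' = pvS pi (i0 + L) by rw [hE2],
          show pvS pi i = pvS pi (i0 - 1) by rw [hE1],
          show pvC pi i = pvC pi (i0 - 1) by rw [hE1]]
      simp
    · rw [if_neg e2, hI i j' h1 hin]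
      by_cases hdom : j' ≤ n ∧ i ≤ j'
      · rw [if_pos hdom, if_pos hdom]
        by_cases c1 : j' - i ≤ L
        · rw [if_pos c1, if_pos c1]
        · rw [if_neg c1, if_neg c1]
          by_cases c2 : j' - i = L + 1
          · rw [if_pos c2, if_pos c2]
            by_cases d1 : i + 2 ≤ i0
            · rw [if_pos d1, if_pos (show i + 2 ≤ i0 + 1 by omega)]
            · by_cases d2 : i + 1 = i0
              · exact absurd ⟨by omega, by omega⟩ e2
              · rw [if_neg d1, if_neg d2, if_neg (show ¬ (i + 2 ≤ i0 + 1) by omega),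
                    if_neg (show ¬ (i + 1 = i0 + 1) by intro hh; exact e1 ⟨by omega, by omega⟩)]
          · rw [if_neg c2, if_neg c2]
      · rw [if_neg hdom, if_neg hdom]

lemma pvFillStep_mid (pi : List (Int × Int)) (n : Nat) (sw c : List Int) (L i0 : Nat)
    (hsw : ∀ k, k ≤ pi.length → sw.getD k 0 = pvS pi k)
    (hc : ∀ k, k ≤ pi.length → c.getD k 0 = pvC pi k)
    (hn : n ≤ pi.length) (hi0 : 1 ≤ i0) (hle : i0 + L ≤ n) (p : List (List Bool))
    (h : pvMid pi n L i0 p) : pvMid pi n L (i0 + 1) (fillStep n sw c L p i0) := by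
  obtain ⟨hsh, hI⟩ := h
  have hguard : getM p i0 (i0 + L) = pvV pi i0 (i0 + L) := by
    rw [hI i0 (i0 + L) hi0 (by omega), if_pos ⟨by omega, by omega⟩, if_pos (by omega)]
  have holdr : ∀ x y, 1 ≤ x → x = i0 → y = i0 + L + 1 → getM p x y = false := by
    intro x y hx mx my
    rw [hI x y hx (by omega)]
    by_cases hyn : y ≤ n
    · rw [if_pos (show y ≤ n ∧ x ≤ y by omega), if_neg (show ¬ (y - x ≤ L) by omega),
          if_pos (show y - x = L + 1 by omega), if_neg (show ¬ (x + 2 ≤ i0) by omega),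
          if_neg (show ¬ (x + 1 = i0) by omega)]
    · rw [if_neg (show ¬ (y ≤ n ∧ x ≤ y) by omega)]
  simp only [fillStep]
  rw [hguard]
  by_cases hv : pvV pi i0 (i0 + L) = true
  · rw [hv]
    simp only [Bool.not_true, Bool.false_eq_true, if_false]
    rw [hsw (i0 + L) (by omega), hsw (i0 - 1) (by omega), hc (i0 - 1) (by omega)]
    by_cases hjn1 : i0 + L + 1 ≤ n
    · rw [if_pos hjn1, hc (i0 + L + 1) (by omega)]
      by_cases hcr : pvS pi (i0 + L) - pvS pi (i0 - 1) ≤ pvC pi (i0 + L + 1)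
      · rw [if_pos hcr]
        have hsh2 : pvShape (setT p i0 (i0 + L + 1)) n := pvShape_setT hsh (by omega) _
        have hg2 : ∀ x y, getM (setT p i0 (i0 + L + 1)) x y
            = if x = i0 ∧ y = i0 + L + 1 then true else getM p x y :=
          pvGetM_setT hsh (by omega) (by omega)
        by_cases hcl : pvS pi (i0 + L) - pvS pi (i0 - 1) ≤ pvC pi (i0 - 1)
        · rw [if_pos hcl]
          refine pvMid_step_general pi n L i0 p _ hsh hI hi0 hle hv true true
            (by simp [hjn1, hcr]) (by simp [hcl])
            (pvShape_setT hsh2 (by omega) _) ?_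
          intro x y hx
          rw [pvGetM_setT hsh2 (by omega) (by omega), hg2]
          by_cases m2 : x = i0 ∧ y = i0 + L + 1
          · obtain ⟨mx, my⟩ := m2
            rw [if_neg (show ¬ (x = i0 - 1 ∧ y = i0 + L) by omega), if_pos ⟨mx, my⟩,
                if_pos ⟨mx, my⟩]
          · by_cases m1 : x = i0 - 1 ∧ y = i0 + L
            · rw [if_pos m1, if_neg m2, if_pos m1]
              simp
            · rw [if_neg m1, if_neg m2, if_neg m2, if_neg m1]
        · rw [if_neg hcl]
          refine pvMid_step_general pi n L i0 p _ hsh hI hi0 hle hv true false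
            (by simp [hjn1, hcr]) (by simp [hcl]) hsh2 ?_
          intro x y hx
          rw [hg2]
          by_cases m2 : x = i0 ∧ y = i0 + L + 1
          · rw [if_pos m2, if_pos m2]
          · rw [if_neg m2, if_neg m2]
            by_cases m1 : x = i0 - 1 ∧ y = i0 + L
            · rw [if_pos m1]
              simp
            · rw [if_neg m1]
      · rw [if_neg hcr]
        by_cases hcl : pvS pi (i0 + L) - pvS pi (i0 - 1) ≤ pvC pi (i0 - 1)
        · rw [if_pos hcl]
          refine pvMid_step_general pi n L i0 p _ hsh hI hi0 hle hv false true
            (by simp [hcr]) (by simp [hcl]) (pvShape_setT hsh (by omega) _) ?_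
          intro x y hx
          rw [pvGetM_setT hsh (by omega) (by omega)]
          by_cases m2 : x = i0 ∧ y = i0 + L + 1
          · obtain ⟨mx, my⟩ := m2
            rw [if_neg (show ¬ (x = i0 - 1 ∧ y = i0 + L) by omega), if_pos ⟨mx, my⟩]
            exact holdr x y hx mx my
          · by_cases m1 : x = i0 - 1 ∧ y = i0 + L
            · rw [if_pos m1, if_neg m2, if_pos m1]
              simp
            · rw [if_neg m1, if_neg m2, if_neg m1]
        · rw [if_neg hcl]
          refine pvMid_step_general pi n L i0 p _ hsh hI hi0 hle hv false false
            (by simp [hcr]) (by simp [hcl]) hsh ?_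
          intro x y hx
          by_cases m2 : x = i0 ∧ y = i0 + L + 1
          · obtain ⟨mx, my⟩ := m2
            rw [if_pos ⟨mx, my⟩]
            exact holdr x y hx mx my
          · rw [if_neg m2]
            by_cases m1 : x = i0 - 1 ∧ y = i0 + L
            · rw [if_pos m1]
              simp
            · rw [if_neg m1]
    · rw [if_neg hjn1]
      by_cases hcl : pvS pi (i0 + L) - pvS pi (i0 - 1) ≤ pvC pi (i0 - 1)
      · rw [if_pos hcl]
        refine pvMid_step_general pi n L i0 p _ hsh hI hi0 hle hv false true
          (by simp [hjn1]) (by simp [hcl]) (pvShape_setT hsh (by omega) _) ?_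
        intro x y hx
        rw [pvGetM_setT hsh (by omega) (by omega)]
        by_cases m2 : x = i0 ∧ y = i0 + L + 1
        · obtain ⟨mx, my⟩ := m2
          rw [if_neg (show ¬ (x = i0 - 1 ∧ y = i0 + L) by omega), if_pos ⟨mx, my⟩]
          exact holdr x y hx mx my
        · by_cases m1 : x = i0 - 1 ∧ y = i0 + L
          · rw [if_pos m1, if_neg m2, if_pos m1]
            simp
          · rw [if_neg m1, if_neg m2, if_neg m1]
      · rw [if_neg hcl]
        refine pvMid_step_general pi n L i0 p _ hsh hI hi0 hle hv false false
          (by simp [hjn1]) (by simp [hcl]) hsh ?_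
        intro x y hx
        by_cases m2 : x = i0 ∧ y = i0 + L + 1
        · obtain ⟨mx, my⟩ := m2
          rw [if_pos ⟨mx, my⟩]
          exact holdr x y hx mx my
        · rw [if_neg m2]
          by_cases m1 : x = i0 - 1 ∧ y = i0 + L
          · rw [if_pos m1]
            simp
          · rw [if_neg m1]
  · have hv' : pvV pi i0 (i0 + L) = false := by
      cases hb : pvV pi i0 (i0 + L) <;> simp_all
    rw [hv']
    simp only [Bool.not_false, if_true]
    refine ⟨hsh, ?_⟩
    intro i j' h1 hin
    rw [hI i j' h1 hin]
    by_cases hdom : j' ≤ n ∧ i ≤ j'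
    · rw [if_pos hdom, if_pos hdom]
      by_cases c1 : j' - i ≤ L
      · rw [if_pos c1, if_pos c1]
      · rw [if_neg c1, if_neg c1]
        by_cases c2 : j' - i = L + 1
        · rw [if_pos c2, if_pos c2]
          by_cases d1 : i + 2 ≤ i0
          · rw [if_pos d1, if_pos (show i + 2 ≤ i0 + 1 by omega)]
          · by_cases d2 : i + 1 = i0
            · rw [if_neg d1, if_pos d2, if_pos (show i + 2 ≤ i0 + 1 by omega)]
              conv_rhs => rw [pvV]
              rw [if_neg (show ¬ (i = j') by omega), if_pos (show i < j' by omega)]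
              rw [show pvV pi (i + 1) j' = pvV pi i0 (i0 + L) by rw [d2, show j' = i0 + L by omega], hv']
              simp
            · by_cases d3 : i + 1 = i0 + 1
              · rw [if_neg d1, if_neg d2, if_neg (show ¬ (i + 2 ≤ i0 + 1) by omega), if_pos d3]
                rw [show pvV pi i (j' - 1) = pvV pi i0 (i0 + L) by
                      rw [show i = i0 by omega, show j' - 1 = i0 + L by omega], hv']
                simp
              · rw [if_neg d1, if_neg d2, if_neg (show ¬ (i + 2 ≤ i0 + 1) by omega), if_neg d3]
        · rw [if_neg c2, if_neg c2]
    · rw [if_neg hdom, if_neg hdom]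

lemma pvMid_to_pass (pi : List (Int × Int)) (n L : Nat) (p : List (List Bool))
    (h : pvMid pi n L (n - L + 1) p) (hL : L < n) : pvMid pi n (L + 1) 1 p := by
  obtain ⟨hsh, hI⟩ := h
  refine ⟨hsh, ?_⟩
  intro i j' h1 hin
  rw [hI i j' h1 hin]
  by_cases hdom : j' ≤ n ∧ i ≤ j'
  · rw [if_pos hdom, if_pos hdom]
    by_cases c1 : j' - i ≤ L
    · rw [if_pos c1, if_pos (show j' - i ≤ L + 1 by omega)]
    · by_cases c2 : j' - i = L + 1
      · rw [if_neg c1, if_pos c2, if_pos (show i + 2 ≤ n - L + 1 by omega),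
            if_pos (show j' - i ≤ L + 1 by omega)]
      · rw [if_neg c1, if_neg c2, if_neg (show ¬ (j' - i ≤ L + 1) by omega)]
        by_cases c3 : j' - i = L + 1 + 1
        · rw [if_pos c3, if_neg (show ¬ (i + 2 ≤ 1) by omega), if_neg (show ¬ (i + 1 = 1) by omega)]
        · rw [if_neg c3]
  · rw [if_neg hdom, if_neg hdom]

lemma pvFillRow (pi : List (Int × Int)) (n : Nat) (sw c : List Int) (L : Nat)
    (hsw : ∀ k, k ≤ pi.length → sw.getD k 0 = pvS pi k)
    (hc : ∀ k, k ≤ pi.length → c.getD k 0 = pvC pi k)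
    (hn : n ≤ pi.length) (hL : L < n) (p : List (List Bool)) (h : pvMid pi n L 1 p) :
    pvMid pi n (L + 1) 1 ((List.range' 1 (n - L)).foldl (fun p i => fillStep n sw c L p i) p) := by
  have main : ∀ m, m ≤ n - L →
      pvMid pi n L (1 + m) ((List.range' 1 m).foldl (fun p i => fillStep n sw c L p i) p) := by
    intro m
    induction m with
    | zero => intro _; simpa using h
    | succ m ih =>
      intro hm
      rw [List.range'_1_concat, List.foldl_append]
      simp only [List.foldl_cons, List.foldl_nil]
      have := pvFillStep_mid pi n sw c L (1 + m) hsw hc hn (by omega) (by omega) _ (ih (by omega))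
      simpa [show 1 + m + 1 = 1 + (m + 1) by omega] using this
  have hfin := main (n - L) le_rfl
  rw [show 1 + (n - L) = n - L + 1 by omega] at hfin
  exact pvMid_to_pass pi n L _ hfin hL

lemma pvFillAll (pi : List (Int × Int)) (n : Nat) (sw c : List Int)
    (hsw : ∀ k, k ≤ pi.length → sw.getD k 0 = pvS pi k)
    (hc : ∀ k, k ≤ pi.length → c.getD k 0 = pvC pi k)
    (hn : n ≤ pi.length) :
    pvMid pi n n 1 ((List.range n).foldl (fun p len_ =>
      (List.range' 1 (n - len_)).foldl (fun p i => fillStep n sw c len_ p i) p)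
      ((List.range (n + 1)).map (fun i => (List.range (n + 1)).map (fun j => decide (i = j))))) := by
  suffices haux : ∀ m, m ≤ n → pvMid pi n m 1 ((List.range m).foldl (fun p len_ =>
      (List.range' 1 (n - len_)).foldl (fun p i => fillStep n sw c len_ p i) p)
      ((List.range (n + 1)).map (fun i => (List.range (n + 1)).map (fun j => decide (i = j))))) by
    rcases Nat.eq_zero_or_pos n with hn0 | hn0
    · subst hn0; simpa using pvMid_init pi 0
    · exact haux n le_rfl
  intro m
  induction m with
  | zero => intro _; simpa using pvMid_init pi n
  | succ m ih =>
    intro hm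
    rw [show List.range (m + 1) = List.range m ++ [m] from List.range_succ, List.foldl_append]
    simp only [List.foldl_cons, List.foldl_nil]
    exact pvFillRow pi n sw c m hsw hc hn (by omega) _ (ih (by omega))

lemma pvTable_eq (pi : List (Int × Int)) (n : Nat) (pf : List (List Bool))
    (h : pvMid pi n n 1 pf) {b e : Nat} (hb1 : 1 ≤ b) (hbn : b ≤ n) (he : e ≤ n) :
    getM pf b e = pvV pi b e := by
  obtain ⟨hsh, hI⟩ := h
  rw [hI b e hb1 hbn]
  by_cases hbe : b ≤ e
  · rw [if_pos ⟨he, hbe⟩, if_pos (show e - b ≤ n by omega)]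
  · rw [if_neg (by intro hh; exact hbe hh.2)]
    exact (pvVgt pi (by omega)).symm

-- dp characterizations
lemma pvDfold_noop (pi : List (Int × Int)) (e : Nat) :
    ∀ (l : List Nat) (a : Int), (∀ b ∈ l, pvV pi b e = false) →
      l.foldl (fun acc b => if pvV pi b e then min acc (pvD pi (b - 1) + 1) else acc) a = a := by
  intro l
  induction l with
  | nil => intro a _; rfl
  | cons x l ih =>
    intro a h
    simp only [List.foldl_cons]
    rw [if_neg (by rw [h x List.mem_cons_self]; simp)]
    exact ih a (fun b hb => h b (List.mem_cons_of_mem _ hb))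

lemma pvD_eq_fold (pi : List (Int × Int)) {e : Nat} (he : 1 ≤ e) :
    pvD pi e = pvDfold pi e (List.range' 1 e) := by
  cases e with
  | zero => omega
  | succ e =>
    unfold pvD
    rw [List.foldl_attach (f := fun acc x => if pvV pi x (e + 1) then min acc (pvD pi (x - 1) + 1) else acc)]
    rfl

lemma pvP_eq_D (pi : List (Int × Int)) {m e : Nat} (h : e ≤ m) : pvP pi m e = pvD pi e := by
  by_cases he : e = 0
  · subst he; simp [pvP, pvD]
  · have hsplit : List.range' 1 m = List.range' 1 e ++ List.range' (1 + e) (m - e) := by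
      rw [List.range'_append_1]; congr 1; omega
    rw [pvP, if_neg he, pvDfold, hsplit, List.foldl_append]
    rw [pvDfold_noop pi e _ _ (fun b hb => pvVgt pi (by have := List.mem_range'_1.mp hb; omega))]
    rw [pvD_eq_fold pi (by omega)]
    rfl

lemma pvP_succ (pi : List (Int × Int)) {b e : Nat} (hb : 1 ≤ b) (he : 1 ≤ e) :
    pvP pi b e = if pvV pi b e then min (pvP pi (b - 1) e) (pvD pi (b - 1) + 1) else pvP pi (b - 1) e := by
  have hsplit : List.range' 1 b = List.range' 1 (b - 1) ++ [b] := by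
    conv_lhs => rw [show b = (b - 1) + 1 by omega]
    rw [List.range'_1_concat]
    congr 2; omega
  have he0 : ¬ e = 0 := by omega
  simp only [pvP, he0, if_false]
  simp only [pvDfold]
  rw [hsplit, List.foldl_append]
  simp only [List.foldl_cons, List.foldl_nil]

lemma pvDpInner (pi : List (Int × Int)) (n : Nat) (pf : List (List Bool))
    (ht : ∀ b e : Nat, 1 ≤ b → b ≤ n → e ≤ n → getM pf b e = pvV pi b e)
    {b : Nat} (hb : 1 ≤ b) (hbn : b ≤ n) (dp : List Int)
    (hlen : dp.length = n + 1) (hdp : ∀ e, e ≤ n → dp.getD e 0 = pvP pi (b - 1) e) :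
    ((List.range' 1 n).foldl (fun dp e => dpStep pf b dp e) dp).length = n + 1
    ∧ ∀ e, e ≤ n → ((List.range' 1 n).foldl (fun dp e => dpStep pf b dp e) dp).getD e 0 = pvP pi b e := by
  have main : ∀ m, m ≤ n →
      ((List.range' 1 m).foldl (fun dp e => dpStep pf b dp e) dp).length = n + 1
      ∧ ∀ e, e ≤ n → ((List.range' 1 m).foldl (fun dp e => dpStep pf b dp e) dp).getD e 0
          = if 1 ≤ e ∧ e ≤ m then pvP pi b e else pvP pi (b - 1) e := by
    intro m
    induction m with
    | zero =>
      intro _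
      refine ⟨by simpa using hlen, ?_⟩
      intro e he
      rw [if_neg (by omega)]
      exact hdp e he
    | succ m ih =>
      intro hm
      obtain ⟨ihl, ihv⟩ := ih (by omega)
      rw [List.range'_1_concat, List.foldl_append]
      simp only [List.foldl_cons, List.foldl_nil]
      set q := (List.range' 1 m).foldl (fun dp e => dpStep pf b dp e) dp with hqdef
      have hgm : getM pf b (1 + m) = pvV pi b (1 + m) := ht b (1 + m) hb hbn (by omega)
      have hrd : q.getD (b - 1) 0 = pvD pi (b - 1) := by
        rw [ihv (b - 1) (by omega)]
        by_cases hcase : 1 ≤ b - 1 ∧ b - 1 ≤ m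
        · rw [if_pos hcase]
          exact pvP_eq_D pi (by omega)
        · rw [if_neg hcase]
          exact pvP_eq_D pi (by omega)
      have hcur : q.getD (1 + m) 0 = pvP pi (b - 1) (1 + m) := by
        rw [ihv (1 + m) (by omega), if_neg (by omega)]
      unfold dpStep
      rw [hgm]
      by_cases hv : pvV pi b (1 + m) = true
      · rw [if_pos hv]
        refine ⟨by simpa using ihl, ?_⟩
        intro e he
        by_cases hem : e = 1 + m
        · subst hem
          rw [pvGetD_set_eq _ _ _ _ (by omega), hcur, hrd]
          rw [if_pos (by omega), pvP_succ pi hb (by omega), if_pos hv]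
        · rw [pvGetD_set_ne _ _ _ (fun hh => hem hh.symm), ihv e he]
          by_cases hc1 : 1 ≤ e ∧ e ≤ m
          · rw [if_pos hc1, if_pos (by omega)]
          · rw [if_neg hc1, if_neg (by omega)]
      · rw [if_neg hv]
        refine ⟨ihl, ?_⟩
        intro e he
        rw [ihv e he]
        by_cases hem : e = 1 + m
        · subst hem
          rw [if_neg (by omega), if_pos (by omega), pvP_succ pi hb (by omega), if_neg hv]
        · by_cases hc1 : 1 ≤ e ∧ e ≤ m
          · rw [if_pos hc1, if_pos (by omega)]
          · rw [if_neg hc1, if_neg (by omega)]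
  obtain ⟨hl, hvv⟩ := main n le_rfl
  refine ⟨hl, ?_⟩
  intro e he
  rw [hvv e he]
  by_cases hc1 : 1 ≤ e ∧ e ≤ n
  · rw [if_pos hc1]
  · rw [if_neg hc1]
    have he0 : e = 0 := by omega
    subst he0
    simp [pvP]

lemma pvDpOuter (pi : List (Int × Int)) (n : Nat) (pf : List (List Bool))
    (ht : ∀ b e : Nat, 1 ≤ b → b ≤ n → e ≤ n → getM pf b e = pvV pi b e) :
    (((List.range' 1 n).foldl (fun dp b =>
        (List.range' 1 n).foldl (fun dp e => dpStep pf b dp e) dp)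
        ((List.replicate (n + 1) (999999999 : Int)).set 0 0)).length = n + 1)
    ∧ ∀ e, e ≤ n → ((List.range' 1 n).foldl (fun dp b =>
        (List.range' 1 n).foldl (fun dp e => dpStep pf b dp e) dp)
        ((List.replicate (n + 1) (999999999 : Int)).set 0 0)).getD e 0 = pvD pi e := by
  have hbase_len : ((List.replicate (n + 1) (999999999 : Int)).set 0 0).length = n + 1 := by simp
  have hbase : ∀ e, e ≤ n → ((List.replicate (n + 1) (999999999 : Int)).set 0 0).getD e 0 = pvP pi 0 e := by
    intro e he
    by_cases he0 : e = 0
    · subst he0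
      rw [pvGetD_set_eq _ _ _ _ (by simp)]
      simp [pvP]
    · rw [pvGetD_set_ne _ _ _ (fun hh => he0 hh.symm),
          pvGetD_eq_getElem _ _ _ (by simpa using (by omega : e < n + 1))]
      simp [pvP, he0, pvDfold]
  have main : ∀ m, m ≤ n →
      (((List.range' 1 m).foldl (fun dp b => (List.range' 1 n).foldl (fun dp e => dpStep pf b dp e) dp)
        ((List.replicate (n + 1) (999999999 : Int)).set 0 0)).length = n + 1)
      ∧ ∀ e, e ≤ n → ((List.range' 1 m).foldl (fun dp b => (List.range' 1 n).foldl (fun dp e => dpStep pf b dp e) dp)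
        ((List.replicate (n + 1) (999999999 : Int)).set 0 0)).getD e 0 = pvP pi m e := by
    intro m
    induction m with
    | zero => exact fun _ => ⟨hbase_len, hbase⟩
    | succ m ih =>
      intro hm
      obtain ⟨ihl, ihv⟩ := ih (by omega)
      rw [List.range'_1_concat, List.foldl_append]
      simp only [List.foldl_cons, List.foldl_nil]
      have step := pvDpInner pi n pf ht (b := 1 + m) (by omega) (by omega) _ ihl
        (fun e he => by rw [ihv e he, show 1 + m - 1 = m by omega])
      refine ⟨step.1, ?_⟩
      intro e he
      rw [step.2 e he, show 1 + m = m + 1 by omega]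
  refine ⟨(main n le_rfl).1, ?_⟩
  intro e he
  rw [(main n le_rfl).2 e he]
  exact pvP_eq_D pi he

lemma pvPortA_eq (pi : List (Int × Int)) (N : Int) (h0 : 0 ≤ N) (hlen : N ≤ (pi.length : Int)) :
    minimum_bottom_walkers N pi = pvD pi N.toNat := by
  have hn : N.toNat ≤ pi.length := by omega
  simp only [minimum_bottom_walkers]
  set n := N.toNat with hndef
  simp only [List.length_cons, List.length_map, Nat.add_sub_cancel]
  have hswspec := pvSumw_spec pi pi.length le_rfl
  set sw := (List.range' 1 pi.length).foldl (fun s i => s.set i (s.getD i 0 + s.getD (i - 1) 0))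
      ((0 : Int) :: pi.map (fun cw => cw.2)) with hswdef
  have hsw1 : ∀ k, k ≤ pi.length → sw.getD k 0 = pvS pi k := hswspec.2.1
  have hc1 : ∀ k, k ≤ pi.length → ((0 : Int) :: pi.map (fun cw => cw.1)).getD k 0 = pvC pi k :=
    fun k hk => pvC_spec pi k hk
  have hmid := pvFillAll pi n sw ((0 : Int) :: pi.map (fun cw => cw.1)) hsw1 hc1 hn
  set pf := (List.range n).foldl (fun p len_ =>
      (List.range' 1 (n - len_)).foldl (fun p i => fillStep n sw ((0 : Int) :: pi.map (fun cw => cw.1)) len_ p i) p)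
      ((List.range (n + 1)).map (fun i => (List.range (n + 1)).map (fun j => decide (i = j)))) with hpfdef
  have ht : ∀ b e : Nat, 1 ≤ b → b ≤ n → e ≤ n → getM pf b e = pvV pi b e :=
    fun b e hb hbn he => pvTable_eq pi n pf hmid hb hbn he
  have hdp := pvDpOuter pi n pf ht
  set dpf := (List.range' 1 n).foldl (fun dp b =>
      (List.range' 1 n).foldl (fun dp e => dpStep pf b dp e) dp)
      ((List.replicate (n + 1) (999999999 : Int)).set 0 0) with hdpfdef
  have hlen : dpf.length = n + 1 := hdp.1
  rw [PySem.List.pyGetD_neg_ofNat dpf 1 0 (by omega) (by simp [PySem.List.len_eq, hlen])]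
  have hidx : dpf.length - 1 = n := by omega
  rw [← pvGetD_eq_getElem dpf (dpf.length - 1) 0 (by omega), hidx]
  exact hdp.2 n le_rfl

-- B-side lemmas
lemma pvPrefCap (pi : List (Int × Int)) : ∀ m, m ≤ pi.length →
    (List.range m).foldl (fun pc k =>
        let cw := pi.getD k (0, 0)
        (pc.1 ++ [pc.1.getLastD 0 + cw.2], pc.2 ++ [cw.1])) ([(0 : Int)], [(0 : Int)])
      = ((List.range (m + 1)).map (pvS pi), (List.range (m + 1)).map (pvC pi)) := by
  intro m
  induction m with
  | zero =>
    intro _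
    simp [List.range_one, pvS, pvC]
  | succ m ih =>
    intro hm
    rw [show List.range (m + 1) = List.range m ++ [m] from List.range_succ, List.foldl_append,
        ih (by omega)]
    simp only [List.foldl_cons, List.foldl_nil]
    have h1 : ((List.range (m + 1)).map (pvS pi)).getLastD 0 = pvS pi m := by
      rw [show List.range (m + 1) = List.range m ++ [m] from List.range_succ]
      simp
    have hS : (List.range (m + 2)).map (pvS pi) = (List.range (m + 1)).map (pvS pi) ++ [pvS pi (m + 1)] := by
      rw [show List.range (m + 2) = List.range (m + 1) ++ [m + 1] from List.range_succ]
      simp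
    have hC : (List.range (m + 2)).map (pvC pi) = (List.range (m + 1)).map (pvC pi) ++ [pvC pi (m + 1)] := by
      rw [show List.range (m + 2) = List.range (m + 1) ++ [m + 1] from List.range_succ]
      simp
    simp only [Prod.mk.injEq]
    constructor
    · rw [hS, h1, pvS_succ pi (show m < pi.length by omega)]
    · rw [hC]
      simp [pvC]

lemma pvDfold_out (pi : List (Int × Int)) (e : Nat) : ∀ (l : List Nat) (a c : Int),
    l.foldl (fun acc b => if pvV pi b e then min acc (pvD pi (b - 1) + 1) else acc) (min a c)
    = min (l.foldl (fun acc b => if pvV pi b e then min acc (pvD pi (b - 1) + 1) else acc) a) c := by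
  intro l
  induction l with
  | nil => intro a c; rfl
  | cons x l ih =>
    intro a c
    simp only [List.foldl_cons]
    by_cases hv : pvV pi x e = true
    · rw [if_pos hv, if_pos hv, show min (min a c) (pvD pi (x - 1) + 1) = min (min a (pvD pi (x - 1) + 1)) c by omega]
      exact ih _ _
    · rw [if_neg hv, if_neg hv]
      exact ih _ _

lemma pvRevDfold (pi : List (Int × Int)) (e : Nat) : ∀ (l : List Nat) (a : Int),
    l.reverse.foldl (fun acc b => if pvV pi b e then min acc (pvD pi (b - 1) + 1) else acc) a
    = l.foldl (fun acc b => if pvV pi b e then min acc (pvD pi (b - 1) + 1) else acc) a := by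
  intro l
  induction l with
  | nil => intro a; rfl
  | cons x l ih =>
    intro a
    rw [List.reverse_cons, List.foldl_append, ih]
    simp only [List.foldl_cons, List.foldl_nil]
    by_cases hv : pvV pi x e = true
    · rw [if_pos hv, if_pos hv, ← pvDfold_out]
    · rw [if_neg hv, if_neg hv]

lemma pvBScan_inv (pi : List (Int × Int)) (n : Nat) (pref cap dp : List Int) (prev : PySem.Set Nat)
    (e : Nat)
    (hpref : ∀ k, k ≤ n → pref.getD k 0 = pvS pi k) (hcap : ∀ k, k ≤ n → cap.getD k 0 = pvC pi k)
    (hdp : ∀ k, k < e → dp.getD k 0 = pvD pi k)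
    (hprev : ∀ x : Nat, PySem.Set.contains prev x = true ↔ (1 ≤ x ∧ x ≤ e - 1 ∧ pvV pi x (e - 1) = true))
    (he1 : 1 ≤ e) (hen : e ≤ n) :
    (∀ x : Nat, PySem.Set.contains (bScan pref cap dp prev e).1 x = true ↔ (1 ≤ x ∧ x ≤ e ∧ pvV pi x e = true))
    ∧ (bScan pref cap dp prev e).2.2 = pvD pi e := by
  simp only [bScan]
  have aux : ∀ k, k ≤ e → ∀ acc : PySem.Set Nat × Bool × Int,
      (∀ x : Nat, PySem.Set.contains acc.1 x = true ↔ (k + 1 ≤ x ∧ x ≤ e ∧ pvV pi x e = true)) →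
      acc.2.1 = pvV pi (k + 1) e →
      acc.2.2 = ((List.range' (k + 1) (e - k)).reverse).foldl
          (fun a b => if pvV pi b e then min a (pvD pi (b - 1) + 1) else a) 999999999 →
      (∀ x : Nat, PySem.Set.contains (((List.range' 1 k).reverse).foldl
        (fun acc b =>
          if (b == e
              || (PySem.Set.contains prev b && decide (pref.getD (e - 1) 0 - pref.getD (b - 1) 0 ≤ cap.getD e 0))
              || (acc.2.1 && decide (pref.getD e 0 - pref.getD b 0 ≤ cap.getD b 0)))
          then (PySem.Set.add acc.1 b, true, min acc.2.2 (dp.getD (b - 1) 0 + 1))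
          else (acc.1, false, acc.2.2)) acc).1 x = true ↔ (1 ≤ x ∧ x ≤ e ∧ pvV pi x e = true))
      ∧ (((List.range' 1 k).reverse).foldl
        (fun acc b =>
          if (b == e
              || (PySem.Set.contains prev b && decide (pref.getD (e - 1) 0 - pref.getD (b - 1) 0 ≤ cap.getD e 0))
              || (acc.2.1 && decide (pref.getD e 0 - pref.getD b 0 ≤ cap.getD b 0)))
          then (PySem.Set.add acc.1 b, true, min acc.2.2 (dp.getD (b - 1) 0 + 1))
          else (acc.1, false, acc.2.2)) acc).2.2
        = ((List.range' 1 e).reverse).foldl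
          (fun a b => if pvV pi b e then min a (pvD pi (b - 1) + 1) else a) 999999999 := by
    intro k
    induction k with
    | zero =>
      intro _ acc hmem hup hval
      refine ⟨by simpa using hmem, ?_⟩
      simpa using hval
    | succ k ih =>
      intro hk acc hmem hup hval
      have hrev : (List.range' 1 (k + 1)).reverse = (k + 1) :: (List.range' 1 k).reverse := by
        rw [List.range'_1_concat, show 1 + k = k + 1 by omega]
        simp
      rw [hrev]
      simp only [List.foldl_cons]
      -- evaluate the condition at b = k + 1
      have hcond : ((k + 1 == e)
          || (PySem.Set.contains prev (k + 1) && decide (pref.getD (e - 1) 0 - pref.getD (k + 1 - 1) 0 ≤ cap.getD e 0))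
          || (acc.2.1 && decide (pref.getD e 0 - pref.getD (k + 1) 0 ≤ cap.getD (k + 1) 0)))
          = pvV pi (k + 1) e := by
        have hmprev : PySem.Set.contains prev (k + 1) = pvV pi (k + 1) (e - 1) ∨ (k + 1 = e) := by
          by_cases hbe : k + 1 = e
          · right; exact hbe
          · left
            cases hb : pvV pi (k + 1) (e - 1)
            · cases hc : PySem.Set.contains prev (k + 1)
              · rfl
              · have := (hprev (k + 1)).mp hc
                rw [hb] at this
                simp at this
            · exact (hprev (k + 1)).mpr ⟨by omega, by omega, hb⟩
        by_cases hbe : k + 1 = e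
        · have : (k + 1 == e) = true := by simp [hbe]
          rw [this]
          simp only [Bool.true_or]
          rw [hbe]
          conv_rhs => rw [pvV]
          simp
        · have hne : (k + 1 == e) = false := by simp [hbe]
          rw [hne]
          simp only [Bool.false_or]
          rcases hmprev with hmprev | hmprev
          · rw [hmprev, hup,
                hpref (e - 1) (by omega), hpref (k + 1 - 1) (by omega), hcap e (by omega),
                hpref e (by omega), hpref (k + 1) (by omega), hcap (k + 1) (by omega)]
            conv_rhs => rw [pvV]
            rw [if_neg hbe, if_pos (by omega)]
          · exact absurd hmprev hbe
      rw [hcond]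
      have hdpk : dp.getD (k + 1 - 1) 0 = pvD pi k := by
        rw [show k + 1 - 1 = k by omega]
        exact hdp k (by omega)
      have hsplit : (List.range' (k + 1) (e - k)).reverse
          = (List.range' (k + 2) (e - (k + 1))).reverse ++ [k + 1] := by
        rw [show e - k = (e - (k + 1)) + 1 by omega, List.range'_succ]
        simp
      by_cases hcv : pvV pi (k + 1) e = true
      · rw [if_pos hcv]
        refine ih (by omega) _ ?_ ?_ ?_
        · intro x
          simp only
          rw [PySem.Set.contains_iff]
          rw [PySem.Set.mem_add]
          constructor
          · rintro (hx | rfl)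
            · have := hmem x
              rw [PySem.Set.contains_iff] at this
              have := this.mp hx
              exact ⟨by omega, this.2.1, this.2.2⟩
            · exact ⟨by omega, by omega, hcv⟩
          · rintro ⟨hx1, hx2, hx3⟩
            by_cases hxk : x = k + 1
            · right; exact hxk
            · left
              have := hmem x
              rw [PySem.Set.contains_iff] at this
              exact this.mpr ⟨by omega, hx2, hx3⟩
        · simpa using hcv.symm
        · simp only
          rw [hval, hdpk, hsplit, List.foldl_append]
          simp only [List.foldl_cons, List.foldl_nil]
          rw [if_pos hcv, show k + 1 - 1 = k by omega]
      · rw [if_neg (by simp [hcv])]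
        refine ih (by omega) _ ?_ ?_ ?_
        · intro x
          simp only
          rw [hmem x]
          constructor
          · rintro ⟨hx1, hx2, hx3⟩
            exact ⟨by omega, hx2, hx3⟩
          · rintro ⟨hx1, hx2, hx3⟩
            refine ⟨?_, hx2, hx3⟩
            by_cases hxk : x = k + 1
            · subst hxk
              exact absurd hx3 hcv
            · omega
        · simp only
          cases hb : pvV pi (k + 1) e
          · rfl
          · exact absurd hb hcv
        · simp only
          rw [hval, hsplit, List.foldl_append]
          simp only [List.foldl_cons, List.foldl_nil]
          rw [if_neg hcv]
  have happ := aux e le_rfl (PySem.Set.empty, false, (999999999 : Int))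
    (by
      intro x
      rw [PySem.Set.contains_iff]
      simp only [PySem.Set.empty]
      simp
      omega)
    (by
      simp only
      exact (pvVgt pi (by omega)).symm)
    (by simp)
  refine ⟨happ.1, ?_⟩
  rw [happ.2, pvRevDfold pi e, ← pvDfold, ← pvD_eq_fold pi he1]

lemma pvPortB_eq (pi : List (Int × Int)) (N : Int) (h0 : 0 ≤ N) (hlen : N ≤ (pi.length : Int)) :
    minimum_bottom_walkers_alt N pi = pvD pi N.toNat := by
  have hn : N.toNat ≤ pi.length := by omega
  simp only [minimum_bottom_walkers_alt]
  set n := N.toNat with hndef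
  rw [pvPrefCap pi n hn]
  simp only
  have hpref : ∀ k, k ≤ n → ((List.range (n + 1)).map (pvS pi)).getD k 0 = pvS pi k :=
    fun k hk => pvMapRange_getD _ _ _ _ (by omega)
  have hcap : ∀ k, k ≤ n → ((List.range (n + 1)).map (pvC pi)).getD k 0 = pvC pi k :=
    fun k hk => pvMapRange_getD _ _ _ _ (by omega)
  have main : ∀ m, m ≤ n →
      ((List.range' 1 m).foldl (fun st e =>
        let r := bScan ((List.range (n + 1)).map (pvS pi)) ((List.range (n + 1)).map (pvC pi)) st.1 st.2 e
        (st.1 ++ [r.2.2], r.1)) (([(0 : Int)] : List Int), (PySem.Set.empty : PySem.Set Nat))).1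
        = (List.range (m + 1)).map (pvD pi)
      ∧ ∀ x : Nat, PySem.Set.contains ((List.range' 1 m).foldl (fun st e =>
        let r := bScan ((List.range (n + 1)).map (pvS pi)) ((List.range (n + 1)).map (pvC pi)) st.1 st.2 e
        (st.1 ++ [r.2.2], r.1)) (([(0 : Int)] : List Int), (PySem.Set.empty : PySem.Set Nat))).2 x = true
        ↔ (1 ≤ x ∧ x ≤ m ∧ pvV pi x m = true) := by
    intro m
    induction m with
    | zero =>
      intro _
      constructor
      · simp [List.range_one, pvD]
      · intro x
        rw [PySem.Set.contains_iff]
        simp only [List.foldl_nil]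
        simp [PySem.Set.empty]
        omega
    | succ m ih =>
      intro hm
      obtain ⟨ih1, ih2⟩ := ih (by omega)
      rw [List.range'_1_concat, List.foldl_append]
      simp only [List.foldl_cons, List.foldl_nil]
      set S := (List.range' 1 m).foldl (fun st e =>
        let r := bScan ((List.range (n + 1)).map (pvS pi)) ((List.range (n + 1)).map (pvC pi)) st.1 st.2 e
        (st.1 ++ [r.2.2], r.1)) (([(0 : Int)] : List Int), (PySem.Set.empty : PySem.Set Nat)) with hSdef
      have hscan := pvBScan_inv pi n ((List.range (n + 1)).map (pvS pi)) ((List.range (n + 1)).map (pvC pi))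
        S.1 S.2 (1 + m) hpref hcap
        (fun k hk => by rw [ih1]; exact pvMapRange_getD _ _ _ _ (by omega))
        (fun x => by rw [show (1 : Nat) + m - 1 = m by omega]; exact ih2 x)
        (by omega) (by omega)
      constructor
      · show S.1 ++ [(bScan ((List.range (n + 1)).map (pvS pi)) ((List.range (n + 1)).map (pvC pi)) S.1 S.2 (1 + m)).2.2] = _
        rw [hscan.2, ih1, show 1 + m = m + 1 by omega,
            show List.range (m + 1 + 1) = List.range (m + 1) ++ [m + 1] from List.range_succ]
        simp
      · intro x
        show PySem.Set.contains (bScan ((List.range (n + 1)).map (pvS pi)) ((List.range (n + 1)).map (pvC pi)) S.1 S.2 (1 + m)).1 x = true ↔ _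
        rw [hscan.1 x, show 1 + m = m + 1 by omega]
  rw [(main n le_rfl).1]
  exact pvMapRange_getD _ _ _ _ (by omega)

-- ===== VERDICT (by name: the statement is the Claim_ definition above) =====
theorem minimum_bottom_walkers_spec : Claim_equal_minimum_bottom_walkers := by
  intro N pi _ hpre
  obtain ⟨h0, hlen⟩ := hpre
  unfold Spec_minimum_bottom_walkers
  rw [pvPortA_eq pi N h0 hlen, pvPortB_eq pi N h0 hlen]
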